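-- pv_equiv track=rewrite | github.com/sin0105/fun411-1- | week13/HW13_1.py | count_vote
-- ===== SOURCE A (Python) =====
-- def count_vote(pref_matrix: list[list[str]]):
--     rev = []
--     for i in pref_matrix:
--         rev.append(['-1']+i[::-1])
--
--     rev_set = tuple()
--     for i in pref_matrix:
--         rev_set+=(tuple(i))
--     rev_set = set(rev_set)
--
--     list_rev = []
--     for i in rev_set:
--         list_rev.append(i)
--     #['Pikachu', 'Rayquaza', 'Mewtwo', 'Charizard', 'Suicune']
--
--     dic = dict()
--     for i in rev:
--         for j in range(len(i)): # 0, 1, 2, 3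
--             dic[i[j]] = j + dic.get(i[j],0)
--
--
--     solute = sorted(map(lambda x: (x,dic[x]),list_rev))
--     result = sorted(solute, key=lambda x: x[1], reverse=True)
--     return result
-- ===== SOURCE B (Python) =====
-- def count_vote(pref_matrix: list[list[str]]):
--     # Prefix-membership counting: a candidate earns one point for every
--     # non-empty prefix of every ballot that contains it (equivalent to the
--     # positional Borda weight), then one composite-key sort.
--     score = {}
--     for row in pref_matrix:
--         for k in range(len(row)):
--             for c in row[:k + 1]:
--                 score[c] = score.get(c, 0) + 1
--     return sorted(score.items(), key=lambda t: (-t[1], t[0]))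
-- ===== Notes on version B (the rewrite author's own statement) =====
-- stated objective: alternative
-- what changed: B replaces A's reversed-rows-with-'-1'-sentinel positional weighting, tuple-concatenation set build, list rebuild and double sort by a prefix-membership count (each candidate gets one point per non-empty ballot prefix containing it, summed in one dict) followed by a single composite-key sort (-score, name); it trades A's linear per-ballot scoring for a quadratic-per-ballot counting pass.
import Mathlib
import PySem

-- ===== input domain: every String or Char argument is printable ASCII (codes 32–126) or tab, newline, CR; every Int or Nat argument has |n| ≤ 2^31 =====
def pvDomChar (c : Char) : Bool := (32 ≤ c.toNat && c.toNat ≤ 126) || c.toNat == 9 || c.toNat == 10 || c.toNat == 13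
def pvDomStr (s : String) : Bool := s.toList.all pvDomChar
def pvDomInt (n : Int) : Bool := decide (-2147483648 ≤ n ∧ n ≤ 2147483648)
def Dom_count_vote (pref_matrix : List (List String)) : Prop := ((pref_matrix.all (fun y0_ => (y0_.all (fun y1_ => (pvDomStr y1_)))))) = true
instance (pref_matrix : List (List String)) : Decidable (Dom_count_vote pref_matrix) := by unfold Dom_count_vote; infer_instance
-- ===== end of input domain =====

-- B replaces A's reversed-rows-with-sentinel positional weighting, set build, list rebuild and
-- double sort by a prefix-membership count (one point per non-empty ballot prefix containing the
-- candidate) and a single composite-key sort (alternative algorithm, not claimed faster).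

-- ===== PORT A =====
-- dic[x] in A is ported as getD _ 0: every x the map visits is a key of dic, so the default is never used.
def count_vote (pref_matrix : List (List String)) : List (String × Int) :=
  let rev : List (List String) :=
    pref_matrix.foldl (fun acc i => acc ++ [["-1"] ++ (PySem.List.slice? i none none (-1)).getD []]) []
  let rev_set : PySem.Set String :=
    PySem.Set.ofList (pref_matrix.foldl (fun acc i => acc ++ i) [])
  let list_rev : List String := rev_set.foldl (fun acc i => acc ++ [i]) []
  let dic : PySem.Dict String Int :=
    rev.foldl (fun d i =>
      (PySem.List.pyRange 0 i.length 1).foldl (fun d j =>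
        d.insert (PySem.List.pyGetD i j "") (j + d.getD (PySem.List.pyGetD i j "") 0)) d)
      PySem.Dict.empty
  let solute := PySem.List.sorted2 (list_rev.map (fun x => (x, dic.getD x 0))) (fun p => p.1) (fun p => p.2) false
  PySem.List.sorted solute (fun p => p.2) true

-- ===== PORT B =====
def count_vote_alt (pref_matrix : List (List String)) : List (String × Int) :=
  let score : PySem.Dict String Int :=
    pref_matrix.foldl (fun d row =>
      (PySem.List.pyRange 0 row.length 1).foldl (fun d k =>
        (PySem.List.slice row none (some (k + 1))).foldl (fun d c =>
          d.insert c (d.getD c 0 + 1)) d) d)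
      PySem.Dict.empty
  PySem.List.sorted2 score.items (fun t => -t.2) (fun t => t.1) false

-- ===== PRECONDITION & SPEC =====
def Spec_count_vote (pref_matrix : List (List String)) (out : List (String × Int)) : Prop := out = count_vote_alt pref_matrix
instance (pref_matrix : List (List String)) (out : List (String × Int)) : Decidable (Spec_count_vote pref_matrix out) := by unfold Spec_count_vote; infer_instance

-- ===== CLAIM (what is proved, stated in full; the proofs are below) =====
def Claim_equal_count_vote : Prop := ∀ (pref_matrix : List (List String)), Dom_count_vote pref_matrix → Spec_count_vote pref_matrix (count_vote pref_matrix)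

-- ===== LEMMAS AND PROOFS =====

def pvLex {α : Type} (before : α → α → Bool) (Q : α → α → Prop) (a b : α) : Prop :=
  before a b = true ∨ (before a b = false ∧ before b a = false ∧ Q a b)

theorem pv_insertBy_mem {α : Type} (before : α → α → Bool) (x y : α) (ys : List α) :
    y ∈ PySem.List.insertBy before x ys ↔ y = x ∨ y ∈ ys := PySem.List.insertBy_mem_iff ..

theorem pv_insertBy_pairwise {α : Type} (before : α → α → Bool) (Q : α → α → Prop)
    (htrans : ∀ a b c, before a b = true → before b c = true → before a c = true)
    (hneg : ∀ a b c, before a b = false → before b c = false → before a c = false)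
    (x : α) (ys : List α)
    (hys : ys.Pairwise (pvLex before Q))
    (hQ : ∀ y ∈ ys, Q y x) :
    (PySem.List.insertBy before x ys).Pairwise (pvLex before Q) := by
  induction ys with
  | nil => simp [PySem.List.insertBy]
  | cons y ys ih =>
    rcases List.pairwise_cons.mp hys with ⟨hy, hys'⟩
    by_cases hxy : before x y = true
    · rw [show PySem.List.insertBy before x (y :: ys) = x :: y :: ys by
        simp [PySem.List.insertBy, hxy]]
      refine List.pairwise_cons.mpr ⟨?_, hys⟩
      intro z hz
      rcases List.mem_cons.mp hz with rfl | hz'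
      · exact Or.inl hxy
      · rcases hy z hz' with h | ⟨h1, h2, _⟩
        · exact Or.inl (htrans x y z hxy h)
        · by_cases hxz : before x z = true
          · exact Or.inl hxz
          · exfalso
            have hxzf : before x z = false := by simpa using hxz
            have := hneg x z y hxzf h2
            rw [hxy] at this
            exact Bool.true_eq_false.mp this
    · have hxy' : before x y = false := by simpa using hxy
      rw [show PySem.List.insertBy before x (y :: ys) = y :: PySem.List.insertBy before x ys by
        simp [PySem.List.insertBy, hxy']]
      refine List.pairwise_cons.mpr ⟨?_, ih hys' (fun z hz => hQ z (List.mem_cons_of_mem _ hz))⟩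
      intro z hz
      rcases (pv_insertBy_mem before x z ys).mp hz with heq | hz'
      · subst heq
        by_cases hyx : before y z = true
        · exact Or.inl hyx
        · exact Or.inr ⟨by simpa using hyx, hxy', hQ y List.mem_cons_self⟩
      · exact hy z hz'

theorem pv_foldl_insertBy_pairwise_aux {α : Type} (before : α → α → Bool) (Q : α → α → Prop)
    (htrans : ∀ a b c, before a b = true → before b c = true → before a c = true)
    (hneg : ∀ a b c, before a b = false → before b c = false → before a c = false)
    (xs : List α) : ∀ (acc : List α), xs.Pairwise Q → acc.Pairwise (pvLex before Q) →
    (∀ a ∈ acc, ∀ x ∈ xs, Q a x) →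
    (xs.foldl (fun acc x => PySem.List.insertBy before x acc) acc).Pairwise (pvLex before Q) := by
  induction xs with
  | nil => intro acc _ hacc _; simpa using hacc
  | cons x xs ih =>
    intro acc hxs hacc hQ
    rcases List.pairwise_cons.mp hxs with ⟨hx, hxs'⟩
    simp only [List.foldl_cons]
    apply ih _ hxs'
    · exact pv_insertBy_pairwise before Q htrans hneg x acc hacc
        (fun y hy => hQ y hy x List.mem_cons_self)
    · intro a ha z hz
      rcases (pv_insertBy_mem before x a acc).mp ha with heq | ha'
      · subst heq; exact hx z hz
      · exact hQ a ha' z (List.mem_cons_of_mem _ hz)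

theorem pv_eq_of_perm_pairwise {α : Type} (R : α → α → Prop)
    (hasym : ∀ a b, R a b → ¬ R b a) :
    ∀ (l1 l2 : List α), (∀ a b, a ≠ b → R a b ∨ R b a) → l1.Perm l2 →
      l1.Pairwise (fun a b => a ≠ b → R a b) →
      l2.Pairwise (fun a b => a ≠ b → R a b) → l1 = l2 := by
  intro l1
  induction l1 with
  | nil => intro l2 _ hp _ _; exact (List.Perm.nil_eq hp).symm ▸ rfl
  | cons a t1 ih =>
    intro l2 htot hp h1 h2
    cases l2 with
    | nil => exact absurd hp.symm (by simp)
    | cons b t2 =>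
      rcases List.pairwise_cons.mp h1 with ⟨ha, h1'⟩
      rcases List.pairwise_cons.mp h2 with ⟨hb, h2'⟩
      by_cases hab : a = b
      · subst hab
        have := ih t2 htot (hp.cons_inv) h1' h2'
        rw [this]
      · exfalso
        have hbmem : b ∈ t1 := by
          have : b ∈ a :: t1 := hp.mem_iff.mpr List.mem_cons_self
          rcases List.mem_cons.mp this with h | h
          · exact absurd h.symm hab
          · exact h
        have hamem : a ∈ t2 := by
          have : a ∈ b :: t2 := hp.mem_iff.mp List.mem_cons_self
          rcases List.mem_cons.mp this with h | h
          · exact absurd h hab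
          · exact h
        exact hasym a b (ha b hbmem hab) (hb a hamem (Ne.symm hab))

-- the Bool comparison a stable sort with a two-component key uses
def pvLt {α κ₁ κ₂ : Type} [LinearOrder κ₁] [LinearOrder κ₂] (k1 : α → κ₁) (k2 : α → κ₂) (a b : α) : Bool :=
  decide (k1 a < k1 b) || (!decide (k1 b < k1 a) && decide (k2 a < k2 b))

theorem pvLt_iff {α κ₁ κ₂ : Type} [LinearOrder κ₁] [LinearOrder κ₂] (k1 : α → κ₁) (k2 : α → κ₂) (a b : α) :
    pvLt k1 k2 a b = true ↔ (k1 a < k1 b ∨ (k1 a ≤ k1 b ∧ k2 a < k2 b)) := by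
  simp [pvLt, not_lt]

theorem pvLt_trans {α κ₁ κ₂ : Type} [LinearOrder κ₁] [LinearOrder κ₂] (k1 : α → κ₁) (k2 : α → κ₂)
    (a b c : α) (h1 : pvLt k1 k2 a b = true) (h2 : pvLt k1 k2 b c = true) : pvLt k1 k2 a c = true := by
  rw [pvLt_iff] at *
  rcases h1 with h1 | ⟨h1l, h1r⟩ <;> rcases h2 with h2 | ⟨h2l, h2r⟩
  · exact Or.inl (lt_trans h1 h2)
  · exact Or.inl (lt_of_lt_of_le h1 h2l)
  · exact Or.inl (lt_of_le_of_lt h1l h2)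
  · exact Or.inr ⟨le_trans h1l h2l, lt_trans h1r h2r⟩

theorem pvLt_false_iff {α κ₁ κ₂ : Type} [LinearOrder κ₁] [LinearOrder κ₂] (k1 : α → κ₁) (k2 : α → κ₂) (a b : α) :
    pvLt k1 k2 a b = false ↔ (k1 b < k1 a ∨ (k1 b ≤ k1 a ∧ k2 b ≤ k2 a)) := by
  rw [← Bool.not_eq_true, pvLt_iff]
  constructor
  · intro h
    rcases lt_trichotomy (k1 a) (k1 b) with h1 | h1 | h1
    · exact absurd (Or.inl h1) h
    · refine Or.inr ⟨le_of_eq h1.symm, ?_⟩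
      rcases le_or_gt (k2 b) (k2 a) with h2 | h2
      · exact h2
      · exact absurd (Or.inr ⟨le_of_eq h1, h2⟩) h
    · exact Or.inl h1
  · rintro (h | ⟨h1, h2⟩) hc
    · rcases hc with hc | ⟨hc1, hc2⟩
      · exact absurd hc (not_lt.mpr (le_of_lt h))
      · exact absurd h (not_lt.mpr hc1)
    · rcases hc with hc | ⟨hc1, hc2⟩
      · exact absurd hc (not_lt.mpr h1)
      · exact absurd hc2 (not_lt.mpr h2)

theorem pvLt_neg {α κ₁ κ₂ : Type} [LinearOrder κ₁] [LinearOrder κ₂] (k1 : α → κ₁) (k2 : α → κ₂)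
    (a b c : α) (h1 : pvLt k1 k2 a b = false) (h2 : pvLt k1 k2 b c = false) : pvLt k1 k2 a c = false := by
  rw [pvLt_false_iff] at *
  rcases h1 with h1 | ⟨h1l, h1r⟩ <;> rcases h2 with h2 | ⟨h2l, h2r⟩
  · exact Or.inl (lt_trans h2 h1)
  · exact Or.inl (lt_of_le_of_lt h2l h1)
  · exact Or.inl (lt_of_lt_of_le h2 h1l)
  · exact Or.inr ⟨le_trans h2l h1l, le_trans h2r h1r⟩

theorem pvLt_tie {α κ₁ κ₂ : Type} [LinearOrder κ₁] [LinearOrder κ₂] (k1 : α → κ₁) (k2 : α → κ₂)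
    (a b : α) (h1 : pvLt k1 k2 a b = false) (h2 : pvLt k1 k2 b a = false) :
    k1 a = k1 b ∧ k2 a = k2 b := by
  rw [pvLt_false_iff] at *
  rcases h1 with h1 | ⟨h1l, h1r⟩ <;> rcases h2 with h2 | ⟨h2l, h2r⟩
  · exact absurd (lt_trans h1 h2) (lt_irrefl _)
  · exact absurd h1 (not_lt.mpr h2l)
  · exact absurd h2 (not_lt.mpr h1l)
  · exact ⟨le_antisymm h2l h1l, le_antisymm h2r h1r⟩

def pvRev {α κ : Type} [LinearOrder κ] (key : α → κ) (a b : α) : Bool := decide (key b < key a)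

theorem pvRev_trans {α κ : Type} [LinearOrder κ] (key : α → κ) (a b c : α)
    (h1 : pvRev key a b = true) (h2 : pvRev key b c = true) : pvRev key a c = true := by
  simp only [pvRev, decide_eq_true_iff] at *
  exact lt_trans h2 h1

theorem pvRev_neg {α κ : Type} [LinearOrder κ] (key : α → κ) (a b c : α)
    (h1 : pvRev key a b = false) (h2 : pvRev key b c = false) : pvRev key a c = false := by
  simp only [pvRev, decide_eq_false_iff_not, not_lt] at *
  exact le_trans h1 h2

theorem pv_sortpw {α : Type} (before : α → α → Bool) (Q : α → α → Prop)
    (htrans : ∀ a b c, before a b = true → before b c = true → before a c = true)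
    (hneg : ∀ a b c, before a b = false → before b c = false → before a c = false)
    (xs : List α) (hxs : xs.Pairwise Q) :
    (xs.foldl (fun acc x => PySem.List.insertBy before x acc) []).Pairwise (pvLex before Q) :=
  pv_foldl_insertBy_pairwise_aux before Q htrans hneg xs [] hxs List.Pairwise.nil (by simp)

-- effect on getD of a fold inserting accumulated weights keyed by snd
theorem pv_getD_foldl_acc (f : Int × String → Int) :
    ∀ (ps : List (Int × String)) (d : PySem.Dict String Int) (x : String),
    (ps.foldl (fun d p => d.insert p.2 (d.getD p.2 0 + f p)) d).getD x 0
      = d.getD x 0 + (ps.map (fun p => if p.2 = x then f p else 0)).sum := by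
  intro ps
  induction ps with
  | nil => simp
  | cons p ps ih =>
    intro d x
    simp only [List.foldl_cons, List.map_cons, List.sum_cons, ih]
    rw [PySem.Dict.getD_insert]
    rcases eq_or_ne x p.2 with h | h
    · subst h
      simp
      omega
    · rw [if_neg h, if_neg (Ne.symm h)]
      omega

-- outer fold over rows, given a per-row additive contribution
theorem pv_getD_outer {β : Type} (F : PySem.Dict String Int → β → PySem.Dict String Int)
    (c : β → String → Int)
    (hF : ∀ d row x, (F d row).getD x 0 = d.getD x 0 + c row x) :
    ∀ (rows : List β) (d : PySem.Dict String Int) (x : String),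
    (rows.foldl F d).getD x 0 = d.getD x 0 + (rows.map (fun r => c r x)).sum := by
  intro rows
  induction rows with
  | nil => simp
  | cons r rows ih =>
    intro d x
    simp only [List.foldl_cons, List.map_cons, List.sum_cons, ih, hF]
    omega

-- items of a dict with nodup keys, as a map over its keys
theorem pv_items_eq_map_keys (d : PySem.Dict String Int) (h : d.keys.Nodup) :
    d.items = d.keys.map (fun k => (k, d.getD k 0)) := by
  have h1 : d.keys.map (fun k => (k, d.getD k 0)) = d.items.map (fun p => (p.1, d.getD p.1 0)) := by
    show (d.items.map (fun p => p.1)).map (fun k => (k, d.getD k 0)) = _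
    rw [List.map_map]; rfl
  rw [h1]
  have : ∀ p ∈ d.items, (fun p : String × Int => (p.1, d.getD p.1 0)) p = id p := by
    intro p hp
    have : d.getD p.1 0 = p.2 :=
      PySem.Dict.getD_of_mem_items d (k := p.1) (v := p.2) (by simpa using hp) h 0
    simp [this]
  rw [List.map_congr_left this, List.map_id]

-- shift-parametric positional weight sum (score of x in one row)
def pvW (row : List String) (x : String) (s : Int) : Int :=
  ((PySem.List.enumerate row s).map (fun p => if p.2 = x then s + row.length - p.1 else 0)).sum

-- positional weights read off the reversed row equal len(row)-idx weights on the row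
theorem pv_revsum (x : String) :
    ∀ (row : List String) (s : Int),
    ((PySem.List.enumerate row.reverse 1).map (fun p => if p.2 = x then p.1 else 0)).sum
      = pvW row x s := by
  intro row
  induction row with
  | nil => simp [PySem.List.enumerate, pvW]
  | cons c t ih =>
    intro s
    unfold pvW
    have hrev : (c :: t).reverse = t.reverse ++ [c] := by simp
    rw [hrev, PySem.List.enumerate_append, PySem.List.enumerate_cons, PySem.List.enumerate_nil]
    rw [PySem.List.enumerate_cons]
    simp only [List.map_append, List.sum_append, List.map_cons, List.map_nil, List.sum_cons,
      List.sum_nil, List.length_reverse, List.length_cons]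
    rw [ih (s + 1)]
    unfold pvW
    have hmap : ((PySem.List.enumerate t (s + 1)).map (fun p => if p.2 = x then (s + 1) + t.length - p.1 else 0))
        = ((PySem.List.enumerate t (s + 1)).map (fun p => if p.2 = x then s + (t.length + 1) - p.1 else 0)) := by
      apply List.map_congr_left
      intro p _
      split_ifs <;> omega
    rw [hmap]
    split_ifs <;> push_cast <;> omega

-- B's per-row score: one point per non-empty prefix containing x
def pvG (row : List String) (x : String) : Int :=
  ((List.range row.length).map (fun k => (((row.take (k + 1)).count x : Nat) : Int))).sum

-- the prefix-membership count equals the positional weight sum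
theorem pv_G_eq_pvW (x : String) :
    ∀ (row : List String) (s : Int), pvG row x = pvW row x s := by
  intro row
  induction row with
  | nil => intro s; simp [pvG, pvW, PySem.List.enumerate]
  | cons c t ih =>
    intro s
    have hG : pvG (c :: t) x
        = (if c = x then (1 : Int) else 0) * ((t.length : Int) + 1) + pvG t x := by
      unfold pvG
      rw [List.length_cons, List.range_succ_eq_map]
      simp only [List.map_cons, List.sum_cons, List.map_map]
      have h0 : (((List.take (0 + 1) (c :: t)).count x : Nat) : Int) = if c = x then 1 else 0 := by
        simp [List.count_cons]
      have h1 : (List.range t.length).map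
            ((fun k => (((List.take (k + 1) (c :: t)).count x : Nat) : Int)) ∘ Nat.succ)
          = (List.range t.length).map
            (fun k => (((List.take (k + 1) t).count x : Nat) : Int) + (if c = x then 1 else 0)) := by
        apply List.map_congr_left
        intro k _
        simp only [Function.comp]
        rw [show Nat.succ k + 1 = (k + 1) + 1 by omega, List.take_succ_cons, List.count_cons]
        push_cast
        by_cases h : c = x <;> simp [h]
      rw [h0, h1, PySem.List.sum_map_add_int, PySem.List.sum_map_const_int, List.length_range]
      split_ifs <;> ring
    have hW : pvW (c :: t) x s
        = (if c = x then ((t.length : Int) + 1) else 0) + pvW t x (s + 1) := by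
      unfold pvW
      rw [PySem.List.enumerate_cons]
      simp only [List.map_cons, List.sum_cons, List.length_cons]
      have hmap : ((PySem.List.enumerate t (s + 1)).map
            (fun p => if p.2 = x then s + ((t.length : Nat) + 1 : Nat) - p.1 else 0))
          = ((PySem.List.enumerate t (s + 1)).map
            (fun p => if p.2 = x then (s + 1) + t.length - p.1 else 0)) := by
        apply List.map_congr_left
        intro p _
        split_ifs
        all_goals omega
      rw [hmap]
      split_ifs
      all_goals omega
    rw [hG, hW, ih (s + 1)]
    split_ifs <;> ring

-- A's per-row contribution read off a reversed-with-sentinel row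
def pvCA (r : List String) (x : String) : Int :=
  ((PySem.List.enumerate r 0).map (fun p => if p.2 = x then p.1 else 0)).sum

theorem pv_rowA (d : PySem.Dict String Int) (r : List String) (x : String) :
    ((PySem.List.pyRange 0 r.length 1).foldl (fun d j =>
        d.insert (PySem.List.pyGetD r j "") (j + d.getD (PySem.List.pyGetD r j "") 0)) d).getD x 0
      = d.getD x 0 + pvCA r x := by
  have h1 : (PySem.List.pyRange 0 r.length 1).foldl (fun d j =>
        d.insert (PySem.List.pyGetD r j "") (j + d.getD (PySem.List.pyGetD r j "") 0)) d
      = (PySem.List.enumerate r 0).foldl (fun d p => d.insert p.2 (d.getD p.2 0 + p.1)) d := by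
    rw [PySem.List.enumerate_eq_map_pyRange (d := ""), List.foldl_map]
    apply PySem.List.foldl_congr_mem
    intro acc j _
    rw [Int.add_comm]
  rw [h1, pv_getD_foldl_acc (f := fun p => p.1)]
  rfl

theorem pv_cA_eq_pvW (i : List String) (x : String) :
    pvCA ("-1" :: i.reverse) x = pvW i x 0 := by
  unfold pvCA
  rw [PySem.List.enumerate_cons]
  simp only [List.map_cons, List.sum_cons]
  have h0 : (if "-1" = x then (0 : Int) else 0) = 0 := by split_ifs <;> rfl
  rw [h0]
  simp only [zero_add]
  rw [pv_revsum x i 0]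

-- B's whole dict is a single counting fold over the concatenated prefix lists
def pvCs (pm : List (List String)) : List String :=
  (pm.map (fun row => ((PySem.List.pyRange 0 row.length 1).map
    (fun k => PySem.List.slice row none (some (k + 1)))).flatten)).flatten

theorem pv_B_dict_eq (pm : List (List String)) :
    pm.foldl (fun d row =>
      (PySem.List.pyRange 0 row.length 1).foldl (fun d k =>
        (PySem.List.slice row none (some (k + 1))).foldl (fun d c =>
          d.insert c (d.getD c 0 + 1)) d) d)
      (PySem.Dict.empty : PySem.Dict String Int)
    = (pvCs pm).foldl (fun d c => d.insert c (d.getD c 0 + 1)) PySem.Dict.empty := by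
  unfold pvCs
  simp only [List.foldl_flatten, List.foldl_map]

theorem pv_mem_cs (pm : List (List String)) (x : String) :
    x ∈ pvCs pm ↔ x ∈ pm.flatten := by
  unfold pvCs
  constructor
  · intro hx
    rcases List.mem_flatten.mp hx with ⟨l, hl, hxl⟩
    rcases List.mem_map.mp hl with ⟨row, hrow, rfl⟩
    rcases List.mem_flatten.mp hxl with ⟨sl, hsl, hxs⟩
    rcases List.mem_map.mp hsl with ⟨k, _, rfl⟩
    exact List.mem_flatten.mpr ⟨row, hrow, PySem.List.mem_of_mem_slice row none (some (k + 1)) hxs⟩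
  · intro hx
    rcases List.mem_flatten.mp hx with ⟨row, hrow, hxr⟩
    have hlen : 1 ≤ row.length := List.length_pos_of_mem hxr
    refine List.mem_flatten.mpr ⟨_, List.mem_map.mpr ⟨row, hrow, rfl⟩, ?_⟩
    refine List.mem_flatten.mpr ⟨PySem.List.slice row none (some (((row.length : Int) - 1) + 1)),
      List.mem_map.mpr ⟨(row.length : Int) - 1, ?_, rfl⟩, ?_⟩
    · rw [PySem.List.mem_pyRange_one]
      omega
    · rw [show ((row.length : Int) - 1) + 1 = ((row.length : Nat) : Int) by ring,
        PySem.List.slice_to_natCast, List.take_length]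
      exact hxr

theorem pv_count_cs (pm : List (List String)) (x : String) :
    ((pvCs pm).count x : Int) = (pm.map (fun row => pvW row x 0)).sum := by
  unfold pvCs
  rw [List.count_flatten, List.map_map, Nat.cast_list_sum, List.map_map]
  congr 1
  apply List.map_congr_left
  intro row _
  simp only [Function.comp]
  rw [List.count_flatten, List.map_map, Nat.cast_list_sum, List.map_map]
  rw [PySem.List.pyRange_one, List.map_map]
  rw [show ((row.length : Int) - 0).toNat = row.length by omega]
  rw [← pv_G_eq_pvW x row 0]
  unfold pvG
  congr 1
  apply List.map_congr_left
  intro k _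
  simp only [Function.comp]
  rw [show (0 : Int) + (k : Int) + 1 = (((k + 1 : Nat) : Int)) by push_cast; ring,
    PySem.List.slice_to_natCast]

-- final order: strictly larger score first, ties by name ascending
def pvR (a b : String × Int) : Prop := b.2 < a.2 ∨ (a.2 = b.2 ∧ a.1 < b.1)

theorem pvR_asym (a b : String × Int) (h : pvR a b) : ¬ pvR b a := by
  rintro (h2 | ⟨h2, h3⟩) <;> rcases h with h | ⟨hl, hr⟩
  · exact absurd h2 (lt_asymm h)
  · exact absurd h2 (by rw [hl]; exact lt_irrefl _)
  · exact absurd h (by rw [h2]; exact lt_irrefl _)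
  · exact absurd h3 (lt_asymm hr)

theorem pvR_tot (a b : String × Int) (hne : a ≠ b) : pvR a b ∨ pvR b a := by
  rcases lt_trichotomy a.2 b.2 with h | h | h
  · exact Or.inr (Or.inl h)
  · have hfst : a.1 ≠ b.1 := by
      intro heq
      exact hne (Prod.ext heq h)
    rcases lt_or_gt_of_ne hfst with h1 | h1
    · exact Or.inl (Or.inr ⟨h, h1⟩)
    · exact Or.inr (Or.inr ⟨h.symm, h1⟩)
  · exact Or.inl (Or.inl h)

-- A's double sort of P equals B's single composite sort of any permutation Q of P
theorem pv_double_sort (P Q : List (String × Int)) (hPQ : P.Perm Q)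
    (hkey : ∀ a ∈ P, ∀ b ∈ P, a.1 = b.1 → a = b) :
    PySem.List.sorted (PySem.List.sorted2 P (fun p => p.1) (fun p => p.2) false) (fun p => p.2) true
      = PySem.List.sorted2 Q (fun x => -x.2) (fun x => x.1) false := by
  have hz1eq : PySem.List.sorted2 P (fun p => p.1) (fun p => p.2) false
      = P.foldl (fun acc x => PySem.List.insertBy (pvLt (fun p : String × Int => p.1) (fun p => p.2)) x acc) [] := rfl
  have hperm1 : (PySem.List.sorted2 P (fun p => p.1) (fun p => p.2) false).Perm P :=
    PySem.List.sorted2_perm ..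
  have hpw1 := pv_sortpw (pvLt (fun p : String × Int => p.1) (fun p => p.2)) (fun _ _ => True)
    (pvLt_trans _ _) (pvLt_neg _ _) P (List.pairwise_of_forall (fun _ _ => trivial))
  rw [← hz1eq] at hpw1
  have hQ1 : (PySem.List.sorted2 P (fun p => p.1) (fun p => p.2) false).Pairwise
      (fun a b => a ≠ b → a.1 < b.1) := by
    refine hpw1.imp_of_mem ?_
    intro a b ha hb hlex hne
    have haP := hperm1.subset ha
    have hbP := hperm1.subset hb
    have hfst : a.1 ≠ b.1 := fun h => hne (hkey a haP b hbP h)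
    rcases hlex with h | ⟨h1, h2, _⟩
    · rcases (pvLt_iff _ _ a b).mp h with h | ⟨hle, _⟩
      · exact h
      · exact lt_of_le_of_ne hle hfst
    · exact absurd (pvLt_tie _ _ a b h1 h2).1 hfst
  have hLeq : PySem.List.sorted (PySem.List.sorted2 P (fun p => p.1) (fun p => p.2) false) (fun p => p.2) true
      = (PySem.List.sorted2 P (fun p => p.1) (fun p => p.2) false).foldl
          (fun acc x => PySem.List.insertBy (pvRev (fun p : String × Int => p.2)) x acc) [] := rfl
  have hpwL := pv_sortpw (pvRev (fun p : String × Int => p.2)) (fun a b => a ≠ b → a.1 < b.1)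
    (pvRev_trans _) (pvRev_neg _) _ hQ1
  rw [← hLeq] at hpwL
  have hpermL : (PySem.List.sorted (PySem.List.sorted2 P (fun p => p.1) (fun p => p.2) false) (fun p => p.2) true).Perm P :=
    (PySem.List.sorted_perm ..).trans hperm1
  have hRL : (PySem.List.sorted (PySem.List.sorted2 P (fun p => p.1) (fun p => p.2) false) (fun p => p.2) true).Pairwise
      (fun a b => a ≠ b → pvR a b) := by
    refine hpwL.imp_of_mem ?_
    intro a b _ _ hlex hne
    rcases hlex with h | ⟨h1, h2, hq⟩
    · exact Or.inl (by simpa [pvRev] using h)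
    · have e1 : ¬ (b.2 < a.2) := by simpa [pvRev] using h1
      have e2 : ¬ (a.2 < b.2) := by simpa [pvRev] using h2
      exact Or.inr ⟨le_antisymm (not_lt.mp e1) (not_lt.mp e2), hq hne⟩
  have hkeyQ : ∀ a ∈ Q, ∀ b ∈ Q, a.1 = b.1 → a = b := by
    intro a ha b hb
    exact hkey a (hPQ.mem_iff.mpr ha) b (hPQ.mem_iff.mpr hb)
  have hBeq : PySem.List.sorted2 Q (fun x => -x.2) (fun x => x.1) false
      = Q.foldl (fun acc x => PySem.List.insertBy (pvLt (fun p : String × Int => -p.2) (fun p => p.1)) x acc) [] := rfl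
  have hpermR : (PySem.List.sorted2 Q (fun x => -x.2) (fun x => x.1) false).Perm Q :=
    PySem.List.sorted2_perm ..
  have hpwB := pv_sortpw (pvLt (fun p : String × Int => -p.2) (fun p => p.1)) (fun _ _ => True)
    (pvLt_trans _ _) (pvLt_neg _ _) Q (List.pairwise_of_forall (fun _ _ => trivial))
  rw [← hBeq] at hpwB
  have hRR : (PySem.List.sorted2 Q (fun x => -x.2) (fun x => x.1) false).Pairwise
      (fun a b => a ≠ b → pvR a b) := by
    refine hpwB.imp_of_mem ?_
    intro a b ha hb hlex hne
    have haP := hpermR.subset ha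
    have hbP := hpermR.subset hb
    rcases hlex with h | ⟨h1, h2, _⟩
    · rcases (pvLt_iff _ _ a b).mp h with h | ⟨hle, hlt⟩
      · exact Or.inl (by omega)
      · rcases lt_or_eq_of_le hle with h' | h'
        · exact Or.inl (by omega)
        · exact Or.inr ⟨by omega, hlt⟩
    · have := pvLt_tie _ _ a b h1 h2
      exact absurd (hkeyQ a haP b hbP this.2) hne
  exact pv_eq_of_perm_pairwise pvR pvR_asym _ _ pvR_tot
    (hpermL.trans (hPQ.trans hpermR.symm)) hRL hRR

-- ===== VERDICT =====
theorem count_vote_spec : Claim_equal_count_vote := by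
  intro pm _
  unfold Spec_count_vote count_vote count_vote_alt
  dsimp only
  have hflat : pm.foldl (fun acc i => acc ++ i) ([] : List String) = pm.flatten := by
    rw [PySem.List.foldl_append_eq_flatten]; rfl
  have hrev : pm.foldl (fun acc i => acc ++ [["-1"] ++ (PySem.List.slice? i none none (-1)).getD []]) [] = pm.map (fun i => "-1" :: i.reverse) := by
    rw [PySem.List.foldl_append_singleton_eq_map]
    simp [PySem.List.slice?_none_none_neg_one]
  have hlistrev : (PySem.Set.ofList pm.flatten).foldl (fun acc i => acc ++ [i]) [] = (PySem.Set.ofList pm.flatten : List String) := by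
    rw [PySem.List.foldl_append_singleton_eq_self]; rfl
  rw [hflat, hrev, hlistrev]
  -- A's listing of (candidate, score)
  have hA : ∀ x : String,
      ((List.map (fun i => "-1" :: i.reverse) pm).foldl
        (fun d i => (PySem.List.pyRange 0 (i.length : Int) 1).foldl
          (fun d j => d.insert (PySem.List.pyGetD i j "") (j + d.getD (PySem.List.pyGetD i j "") 0)) d)
        PySem.Dict.empty).getD x 0
      = (pm.map (fun i => pvW i x 0)).sum := by
    intro x
    rw [pv_getD_outer _ (fun r y => pvCA r y) (fun d r y => pv_rowA d r y) _ PySem.Dict.empty x]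
    rw [List.map_map]
    have h1 : (PySem.Dict.empty : PySem.Dict String Int).getD x 0 = 0 := by
      simp [PySem.Dict.getD_empty]
    rw [h1, zero_add]
    congr 1
    apply List.map_congr_left
    intro i _
    exact pv_cA_eq_pvW i x
  -- B's dict as a counter over pvCs
  rw [pv_B_dict_eq]
  set dicB := (pvCs pm).foldl (fun d c => d.insert c (d.getD c 0 + 1)) (PySem.Dict.empty : PySem.Dict String Int) with hdicB
  have hkeys : dicB.keys = PySem.Set.ofList (pvCs pm) := by
    rw [hdicB, PySem.Dict.keys_foldl_insert]
    simp [PySem.Set.update_nil_left]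
  have hnodup : dicB.keys.Nodup := by
    rw [hkeys]; exact PySem.Set.nodup_ofList ..
  have hgetD : ∀ x : String, dicB.getD x 0 = (pm.map (fun i => pvW i x 0)).sum := by
    intro x
    rw [hdicB, PySem.Dict.getD_foldl_insert_add_one]
    rw [show (PySem.Dict.empty : PySem.Dict String Int).getD x 0 = 0 by simp [PySem.Dict.getD_empty]]
    rw [zero_add]
    exact pv_count_cs pm x
  have hitems : dicB.items = (PySem.Set.ofList (pvCs pm) : List String).map
      (fun k => (k, (pm.map (fun i => pvW i k 0)).sum)) := by
    rw [pv_items_eq_map_keys dicB hnodup, hkeys]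
    apply List.map_congr_left
    intro k _
    rw [hgetD k]
  -- A's listing rewritten
  have hP : (PySem.Set.ofList pm.flatten : List String).map (fun x =>
      (x, ((List.map (fun i => "-1" :: i.reverse) pm).foldl
        (fun d i => (PySem.List.pyRange 0 (i.length : Int) 1).foldl
          (fun d j => d.insert (PySem.List.pyGetD i j "") (j + d.getD (PySem.List.pyGetD i j "") 0)) d)
        PySem.Dict.empty).getD x 0))
      = (PySem.Set.ofList pm.flatten : List String).map (fun x => (x, (pm.map (fun i => pvW i x 0)).sum)) := by
    apply List.map_congr_left
    intro x _
    rw [hA x]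
  rw [hP, hitems]
  -- the two listings are permutations: same nodup key lists as sets, same score function
  have hpermKeys : (PySem.Set.ofList pm.flatten : List String).Perm (PySem.Set.ofList (pvCs pm)) := by
    rw [List.perm_ext_iff_of_nodup (PySem.Set.nodup_ofList ..) (PySem.Set.nodup_ofList ..)]
    intro a
    rw [PySem.Set.mem_ofList, PySem.Set.mem_ofList, ← pv_mem_cs pm a]
  apply pv_double_sort _ _ (hpermKeys.map _)
  intro a ha b hb hfst
  rcases List.mem_map.mp ha with ⟨xa, _, rfl⟩
  rcases List.mem_map.mp hb with ⟨xb, _, rfl⟩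
  simp only at hfst
  rw [hfst]
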